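-- pv_equiv track=rewrite | github.com/geokal/refactor_GPT | scripts/check_layout_sections.py | _strip_leading_noise
-- ===== SOURCE A (Python) =====
-- def _strip_leading_noise(s: str) -> str:
--     s = s.lstrip("\ufeff")  # BOM
--     lines = s.splitlines()
--     i = 0
--     # drop leading blank lines
--     while i < len(lines) and lines[i].strip() == "":
--         i += 1
--     # drop leading HTML/Razor comments
--     while i < len(lines):
--         line = lines[i].lstrip()
--         if line.startswith("<!--"):
--             # skip HTML comment
--             j = i
--             closed = False
--             while j < len(lines):
--                 if "-->" in lines[j]:
--                     i = j + 1
--                     closed = True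
--                     break
--                 j += 1
--             if not closed:
--                 break
--             while i < len(lines) and lines[i].strip() == "":
--                 i += 1
--             continue
--         if line.startswith("@*"):
--             # skip Razor comment
--             j = i
--             closed = False
--             while j < len(lines):
--                 if "*@" in lines[j]:
--                     i = j + 1
--                     closed = True
--                     break
--                 j += 1
--             if not closed:
--                 break
--             while i < len(lines) and lines[i].strip() == "":
--                 i += 1
--             continue
--         break
--     return "\n".join(lines[i:])
-- ===== SOURCE B (Python) =====
-- def _strip_leading_noise(s: str) -> str:
--     # Single-pass state machine over the line index: `close` holds the expected
--     # closing token while inside a comment, `open_at` remembers where it opened.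
--     s = s.lstrip("\ufeff")  # BOM
--     lines = s.splitlines()
--     i = 0
--     close = None
--     open_at = 0
--     while i < len(lines):
--         if close is not None:
--             if close in lines[i]:
--                 close = None
--             i += 1
--             continue
--         if lines[i].strip() == "":
--             i += 1
--             continue
--         line = lines[i].lstrip()
--         if line.startswith("<!--"):
--             open_at = i
--             close = "-->"
--         elif line.startswith("@*"):
--             open_at = i
--             close = "*@"
--         else:
--             break
--         if close in lines[i]:
--             close = None
--         i += 1
--     if close is not None:
--         i = open_at  # unclosed comment: keep text from its opening line
--     return "\n".join(lines[i:])
-- ===== Notes on version B (the rewrite author's own statement) =====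
-- stated objective: alternative
-- what changed: Replaces A's nested loops (outer scan with an inner forward scan for the closing token plus a separate blank-skip loop after each comment) by one single-pass state machine over the line index whose `close` variable carries the expected closing token, with `open_at` restoring the index on an unclosed comment.
import Mathlib
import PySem

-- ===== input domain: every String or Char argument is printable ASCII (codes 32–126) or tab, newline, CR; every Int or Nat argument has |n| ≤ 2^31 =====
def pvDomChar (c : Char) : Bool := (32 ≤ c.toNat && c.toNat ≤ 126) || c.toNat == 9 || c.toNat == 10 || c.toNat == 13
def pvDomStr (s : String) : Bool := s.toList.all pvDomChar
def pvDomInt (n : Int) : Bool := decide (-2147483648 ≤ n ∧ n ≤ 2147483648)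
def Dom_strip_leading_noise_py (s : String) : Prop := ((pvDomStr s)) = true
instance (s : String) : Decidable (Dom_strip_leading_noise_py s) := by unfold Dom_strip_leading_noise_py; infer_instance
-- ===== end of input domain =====

-- B is an alternative decomposition: A's nested scans become one single-pass state machine.

-- ===== PORT A =====
-- inner scan "while j < len(lines): if tok in lines[j]: i = j+1; closed=True; break; j += 1"
-- result: some (j+1) when closed, none when the scan falls off the end (closed stays False)
def pvFindCloseA (lines : List (List Char)) (tok : List Char) (j : Nat) : Option Nat :=
  if h : j < lines.length then
    if PySem.Chars.isIn tok lines[j] then some (j + 1) else pvFindCloseA lines tok (j + 1)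
  else none
termination_by lines.length - j

-- "while i < len(lines) and lines[i].strip() == '': i += 1"
def pvSkipBlankA (lines : List (List Char)) (i : Nat) : Nat :=
  if h : i < lines.length then
    if PySem.Chars.strip lines[i] = [] then pvSkipBlankA lines (i + 1) else i
  else i
termination_by lines.length - i

theorem pvFindCloseA_gt (lines : List (List Char)) (tok : List Char) (j i' : Nat)
    (h : pvFindCloseA lines tok j = some i') : j < i' := by
  fun_induction pvFindCloseA lines tok j with
  | case1 j hj htok => simp only [Option.some.injEq] at h; omega
  | case2 j hj htok ih => exact Nat.lt_of_le_of_lt (Nat.le_succ j) (ih h)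
  | case3 j hj => simp at h

theorem pvSkipBlankA_ge (lines : List (List Char)) (i : Nat) : i ≤ pvSkipBlankA lines i := by
  fun_induction pvSkipBlankA lines i with
  | case1 i hi hb ih => exact Nat.le_of_succ_le ih
  | case2 i hi hb => exact Nat.le_refl i
  | case3 i hi => exact Nat.le_refl i

-- "while i < len(lines): line = lines[i].lstrip(); if startswith '<!--' … '@*' … else break"
def pvLoopA (lines : List (List Char)) (i : Nat) : Nat :=
  if h : i < lines.length then
    let line := PySem.Chars.lstrip lines[i]
    if PySem.Chars.startswith line ("<!--".toList) then
      match hm : pvFindCloseA lines ("-->".toList) i with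
      | some i' => pvLoopA lines (pvSkipBlankA lines i')
      | none => i
    else if PySem.Chars.startswith line ("@*".toList) then
      match hm : pvFindCloseA lines ("*@".toList) i with
      | some i' => pvLoopA lines (pvSkipBlankA lines i')
      | none => i
    else i
  else i
termination_by lines.length - i
decreasing_by
  · have := pvFindCloseA_gt lines _ i i' hm
    have := pvSkipBlankA_ge lines i'
    omega
  · have := pvFindCloseA_gt lines _ i i' hm
    have := pvSkipBlankA_ge lines i'
    omega

def strip_leading_noise_py (s : String) : String :=
  -- s.lstrip("\ufeff"): drop leading U+FEFF chars (exact: one-char strip set = dropWhile that char)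
  let cs := s.toList.dropWhile (fun c => c == '\ufeff')
  let lines := PySem.Chars.splitlines cs
  let i := pvLoopA lines (pvSkipBlankA lines 0)
  String.ofList (PySem.Chars.join ("\n".toList) (lines.drop i))

-- ===== PORT B =====
-- single while loop; `close` = expected closing token (none outside a comment), `openAt` = line where it opened
def pvLoopB (lines : List (List Char)) (close : Option (List Char)) (openAt i : Nat) : Nat :=
  if h : i < lines.length then
    match close with
    | some tok =>
      if PySem.Chars.isIn tok lines[i] then pvLoopB lines none openAt (i + 1)
      else pvLoopB lines (some tok) openAt (i + 1)
    | none =>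
      if PySem.Chars.strip lines[i] = [] then pvLoopB lines none openAt (i + 1)
      else
      let line := PySem.Chars.lstrip lines[i]
      if PySem.Chars.startswith line ("<!--".toList) then
        if PySem.Chars.isIn ("-->".toList) lines[i] then pvLoopB lines none i (i + 1)
        else pvLoopB lines (some ("-->".toList)) i (i + 1)
      else if PySem.Chars.startswith line ("@*".toList) then
        if PySem.Chars.isIn ("*@".toList) lines[i] then pvLoopB lines none i (i + 1)
        else pvLoopB lines (some ("*@".toList)) i (i + 1)
      else i
  else
    match close with
    | some _ => openAt  -- unclosed comment: keep text from its opening line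
    | none => i
termination_by lines.length - i

def strip_leading_noise_py_alt (s : String) : String :=
  let cs := s.toList.dropWhile (fun c => c == '\ufeff')
  let lines := PySem.Chars.splitlines cs
  let i := pvLoopB lines none 0 0
  String.ofList (PySem.Chars.join ("\n".toList) (lines.drop i))

-- ===== PRECONDITION & SPEC =====
def Spec_strip_leading_noise_py (s : String) (out : String) : Prop := out = strip_leading_noise_py_alt s
instance (s : String) (out : String) : Decidable (Spec_strip_leading_noise_py s out) := by unfold Spec_strip_leading_noise_py; infer_instance

-- ===== CLAIM (what is proved, stated in full; the proofs are below) =====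
def Claim_equal_strip_leading_noise_py : Prop := ∀ (s : String), Dom_strip_leading_noise_py s → Spec_strip_leading_noise_py s (strip_leading_noise_py s)

-- ===== LEMMAS AND PROOFS =====

-- Joint invariant, by strong induction on the remaining length: outside a comment B's loop
-- equals A's blank-skip-then-loop; inside one it equals A's inner scan followed by A's loop.
theorem pvLoop_invariant (lines : List (List Char)) :
    ∀ n i, lines.length - i ≤ n →
      (∀ openAt, pvLoopB lines none openAt i = pvLoopA lines (pvSkipBlankA lines i)) ∧
      (∀ openAt tok, pvLoopB lines (some tok) openAt i =
        match pvFindCloseA lines tok i with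
        | some i' => pvLoopA lines (pvSkipBlankA lines i')
        | none => openAt) := by
  intro n
  induction n with
  | zero =>
    intro i hle
    have hge : lines.length ≤ i := by omega
    have hni : ¬ i < lines.length := by omega
    constructor
    · intro openAt
      rw [pvLoopB, pvSkipBlankA, pvLoopA]
      simp [hni]
    · intro openAt tok
      rw [pvLoopB, pvFindCloseA]
      simp [hni]
  | succ n ih =>
    intro i hle
    by_cases hi : i < lines.length
    · have hstep : lines.length - (i + 1) ≤ n := by omega
      constructor
      · intro openAt
        rw [pvLoopB, pvSkipBlankA]
        simp only [hi, dif_pos]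
        by_cases hb : PySem.Chars.strip lines[i] = []
        · rw [if_pos hb, if_pos hb]
          exact (ih (i + 1) hstep).1 openAt
        · rw [if_neg hb, if_neg hb]
          rw [pvLoopA]
          simp only [hi, dif_pos]
          by_cases h1 : PySem.Chars.startswith (PySem.Chars.lstrip lines[i]) ("<!--".toList) = true
          · rw [if_pos h1, if_pos h1]
            have hf : pvFindCloseA lines ("-->".toList) i =
                if PySem.Chars.isIn ("-->".toList) lines[i] then some (i + 1)
                else pvFindCloseA lines ("-->".toList) (i + 1) := by
              conv_lhs => rw [pvFindCloseA]
              simp [hi]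
            by_cases hin : PySem.Chars.isIn ("-->".toList) lines[i] = true
            · rw [if_pos hin] at hf
              rw [if_pos hin]
              split
              · next i' heq =>
                rw [hf] at heq
                injection heq with heq
                subst heq
                exact (ih (i + 1) hstep).1 i
              · next heq => rw [hf] at heq; cases heq
            · rw [if_neg hin] at hf
              rw [if_neg hin, (ih (i + 1) hstep).2 i ("-->".toList), ← hf]
              cases pvFindCloseA lines ("-->".toList) i <;> rfl
          · rw [if_neg h1, if_neg h1]
            by_cases h2 : PySem.Chars.startswith (PySem.Chars.lstrip lines[i]) ("@*".toList) = true
            · rw [if_pos h2, if_pos h2]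
              have hf : pvFindCloseA lines ("*@".toList) i =
                if PySem.Chars.isIn ("*@".toList) lines[i] then some (i + 1)
                else pvFindCloseA lines ("*@".toList) (i + 1) := by
                conv_lhs => rw [pvFindCloseA]
                simp [hi]
              by_cases hin : PySem.Chars.isIn ("*@".toList) lines[i] = true
              · rw [if_pos hin] at hf
                rw [if_pos hin]
                split
                · next i' heq =>
                  rw [hf] at heq
                  injection heq with heq
                  subst heq
                  exact (ih (i + 1) hstep).1 i
                · next heq => rw [hf] at heq; cases heq
              · rw [if_neg hin] at hf
                rw [if_neg hin, (ih (i + 1) hstep).2 i ("*@".toList), ← hf]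
                cases pvFindCloseA lines ("*@".toList) i <;> rfl
            · rw [if_neg h2, if_neg h2]
      · intro openAt tok
        rw [pvLoopB]
        conv_rhs => rw [pvFindCloseA]
        simp only [hi, dif_pos]
        by_cases hin : PySem.Chars.isIn tok lines[i] = true
        · rw [if_pos hin, if_pos hin]
          exact (ih (i + 1) hstep).1 openAt
        · rw [if_neg hin, if_neg hin]
          exact (ih (i + 1) hstep).2 openAt tok
    · -- i past the end: reuse the zero case
      constructor
      · intro openAt
        rw [pvLoopB, pvSkipBlankA, pvLoopA]; simp [hi]
      · intro openAt tok
        rw [pvLoopB, pvFindCloseA]; simp [hi]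

-- ===== VERDICT (by name: the statement is the Claim_ definition above) =====
theorem strip_leading_noise_py_spec : Claim_equal_strip_leading_noise_py := by
  intro s _
  unfold Spec_strip_leading_noise_py strip_leading_noise_py strip_leading_noise_py_alt
  have h := (pvLoop_invariant (PySem.Chars.splitlines (s.toList.dropWhile (fun c => c == '\ufeff')))
      (PySem.Chars.splitlines (s.toList.dropWhile (fun c => c == '\ufeff'))).length 0 (by omega)).1 0
  simp only [h]
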